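-- pv_equiv track=rewrite | github.com/tallyfy/migrator | monday/src/transformers/board_transformer.py | _determine_primary_view
-- ===== SOURCE A (Python) =====
-- from typing import Dict, Any, List, Optional
--
-- def _determine_primary_view(views: List[Dict[str, Any]]) -> str:
--     """Determine the primary view type used in the board.
--
--     Args:
--         views: List of board views
--
--     Returns:
--         Primary view type
--     """
--     if not views:
--         return 'table'  # Default
--
--     # Check for Kanban view (requires special transformation)
--     for view in views:
--         if view.get('type') == 'kanban':
--             return 'kanban'
--
--     # Check for Timeline/Gantt (requires dependency handling)
--     for view in views:
--         if view.get('type') in ['timeline', 'gantt']: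
--             return 'timeline'
--
--     # Check for Calendar view
--     for view in views:
--         if view.get('type') == 'calendar':
--             return 'calendar'
--
--     # Default to table view
--     return 'table'
-- ===== SOURCE B (Python) =====
-- def _determine_primary_view(views):
--     """Single pass: fold the minimum priority rank of the view types, then map it back."""
--     rank = {'kanban': 0, 'timeline': 1, 'gantt': 1, 'calendar': 2}
--     best = 3
--     for v in views:
--         best = min(best, rank.get(v.get('type'), 3))
--     if best == 0:
--         return 'kanban'
--     if best == 1:
--         return 'timeline'
--     if best == 2:
--         return 'calendar'
--     return 'table'
-- ===== Notes on version B (the rewrite author's own statement) =====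
-- stated objective: alternative
-- what changed: Replaces A's three staged priority scans by a single fold that accumulates the minimum priority rank of the view types (via a rank table) and maps the final rank back to a name.
import Mathlib
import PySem

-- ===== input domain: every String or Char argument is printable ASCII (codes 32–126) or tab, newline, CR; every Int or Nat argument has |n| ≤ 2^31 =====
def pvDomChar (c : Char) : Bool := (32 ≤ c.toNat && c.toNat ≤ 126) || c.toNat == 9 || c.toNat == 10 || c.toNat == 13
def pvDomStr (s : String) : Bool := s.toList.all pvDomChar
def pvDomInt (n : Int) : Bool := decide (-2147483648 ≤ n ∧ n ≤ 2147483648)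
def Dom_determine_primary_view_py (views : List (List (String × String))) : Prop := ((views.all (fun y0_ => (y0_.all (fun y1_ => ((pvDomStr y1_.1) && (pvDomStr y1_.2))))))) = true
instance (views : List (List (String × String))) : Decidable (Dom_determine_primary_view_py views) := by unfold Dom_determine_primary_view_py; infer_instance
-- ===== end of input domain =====

-- B replaces A's three staged priority scans by a single fold accumulating the minimum
-- priority rank of the view types, mapped back to a name at the end (objective: alternative).

-- ===== PORT A =====
-- first loop: return 'kanban' on the first view whose type is 'kanban'
def pvLoopKanban : List (List (String × String)) → Option String
  | [] => none
  | v :: rest =>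
    if (PySem.Dict.mk v).get? "type" = some "kanban" then some "kanban" else pvLoopKanban rest

-- second loop: return 'timeline' on the first view whose type is in ['timeline', 'gantt']
def pvLoopTimeline : List (List (String × String)) → Option String
  | [] => none
  | v :: rest =>
    if (PySem.Dict.mk v).get? "type" = some "timeline" ∨ (PySem.Dict.mk v).get? "type" = some "gantt" then
      some "timeline"
    else pvLoopTimeline rest

-- third loop: return 'calendar' on the first view whose type is 'calendar'
def pvLoopCalendar : List (List (String × String)) → Option String
  | [] => none
  | v :: rest =>
    if (PySem.Dict.mk v).get? "type" = some "calendar" then some "calendar" else pvLoopCalendar rest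

def determine_primary_view_py (views : List (List (String × String))) : String :=
  if views = [] then "table"
  else
    match pvLoopKanban views with
    | some s => s
    | none =>
      match pvLoopTimeline views with
      | some s => s
      | none =>
        match pvLoopCalendar views with
        | some s => s
        | none => "table"

-- ===== PORT B =====
-- Source B's literal rank dict
def pvRankTbl : PySem.Dict String Nat :=
  PySem.Dict.mk [("kanban", 0), ("timeline", 1), ("gantt", 1), ("calendar", 2)]

-- rank.get(v.get('type'), 3): a missing 'type' key (None in Python) also takes the default 3
def pvRank (t : Option String) : Nat :=
  match t with
  | some s => pvRankTbl.getD s 3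
  | none => 3

def determine_primary_view_py_alt (views : List (List (String × String))) : String :=
  let best := views.foldl (fun b v => min b (pvRank ((PySem.Dict.mk v).get? "type"))) 3
  if best = 0 then "kanban"
  else if best = 1 then "timeline"
  else if best = 2 then "calendar"
  else "table"

-- ===== PRECONDITION & SPEC =====
def Spec_determine_primary_view_py (views : List (List (String × String))) (out : String) : Prop := out = determine_primary_view_py_alt views
instance (views : List (List (String × String))) (out : String) : Decidable (Spec_determine_primary_view_py views out) := by unfold Spec_determine_primary_view_py; infer_instance

-- ===== CLAIM =====
def Claim_equal_determine_primary_view_py : Prop := ∀ (views : List (List (String × String))), Dom_determine_primary_view_py views → Spec_determine_primary_view_py views (determine_primary_view_py views)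

-- ===== LEMMAS AND PROOFS =====

-- the minimum rank over a list of views, written via membership of the mapped types
def pvMinRank (vs : List (List (String × String))) : Nat :=
  if some "kanban" ∈ vs.map (fun v => (PySem.Dict.mk v).get? "type") then 0
  else if some "timeline" ∈ vs.map (fun v => (PySem.Dict.mk v).get? "type")
      ∨ some "gantt" ∈ vs.map (fun v => (PySem.Dict.mk v).get? "type") then 1
  else if some "calendar" ∈ vs.map (fun v => (PySem.Dict.mk v).get? "type") then 2
  else 3

theorem pvRank_eq (t : Option String) :
    pvRank t = if t = some "kanban" then 0
      else if t = some "timeline" ∨ t = some "gantt" then 1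
      else if t = some "calendar" then 2 else 3 := by
  match t with
  | none => simp [pvRank]
  | some s =>
    by_cases h1 : s = "kanban"
    · subst h1; simp [pvRank, pvRankTbl, PySem.Dict.getD]; decide
    · by_cases h2 : s = "timeline"
      · subst h2; simp [pvRank, pvRankTbl, PySem.Dict.getD]; decide
      · by_cases h3 : s = "gantt"
        · subst h3; simp [pvRank, pvRankTbl, PySem.Dict.getD]; decide
        · by_cases h4 : s = "calendar"
          · subst h4; simp [pvRank, pvRankTbl, PySem.Dict.getD]; decide
          · have e1 : ("kanban" == s) = false := beq_eq_false_iff_ne.mpr (fun e => h1 e.symm)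
            have e2 : ("timeline" == s) = false := beq_eq_false_iff_ne.mpr (fun e => h2 e.symm)
            have e3 : ("gantt" == s) = false := beq_eq_false_iff_ne.mpr (fun e => h3 e.symm)
            have e4 : ("calendar" == s) = false := beq_eq_false_iff_ne.mpr (fun e => h4 e.symm)
            simp [pvRank, pvRankTbl, PySem.Dict.getD, PySem.Dict.get?, List.find?,
              e1, e2, e3, e4, h1, h2, h3, h4]

theorem pvFold_eq (vs : List (List (String × String))) : ∀ b : Nat, b ≤ 3 →
    vs.foldl (fun b v => min b (pvRank ((PySem.Dict.mk v).get? "type"))) b = min b (pvMinRank vs) := by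
  induction vs with
  | nil => intro b hb; simp [pvMinRank]; omega
  | cons v rest ih =>
    intro b hb
    have hr : min b (pvRank ((PySem.Dict.mk v).get? "type")) ≤ 3 := le_trans (min_le_left _ _) hb
    simp only [List.foldl_cons, ih _ hr]
    rw [min_assoc]
    congr 1
    rw [pvRank_eq]
    unfold pvMinRank
    simp only [List.map_cons, List.mem_cons]
    split_ifs <;> first | rfl | omega | tauto

theorem pvLoopKanban_eq (vs : List (List (String × String))) :
    pvLoopKanban vs =
      if some "kanban" ∈ vs.map (fun v => (PySem.Dict.mk v).get? "type") then some "kanban" else none := by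
  induction vs with
  | nil => simp [pvLoopKanban]
  | cons v rest ih =>
    by_cases h : (PySem.Dict.mk v).get? "type" = some "kanban"
    · simp [pvLoopKanban, h, List.mem_cons]
    · have h' : ¬ some "kanban" = (PySem.Dict.mk v).get? "type" := fun e => h e.symm
      simp [pvLoopKanban, ih, List.mem_cons, h, h']

theorem pvLoopTimeline_eq (vs : List (List (String × String))) :
    pvLoopTimeline vs =
      if some "timeline" ∈ vs.map (fun v => (PySem.Dict.mk v).get? "type")
          ∨ some "gantt" ∈ vs.map (fun v => (PySem.Dict.mk v).get? "type") then some "timeline"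
      else none := by
  induction vs with
  | nil => simp [pvLoopTimeline]
  | cons v rest ih =>
    by_cases h1 : (PySem.Dict.mk v).get? "type" = some "timeline"
    · simp [pvLoopTimeline, h1, List.mem_cons]
    · by_cases h2 : (PySem.Dict.mk v).get? "type" = some "gantt"
      · simp [pvLoopTimeline, h2, List.mem_cons]
      · have h1' : ¬ some "timeline" = (PySem.Dict.mk v).get? "type" := fun e => h1 e.symm
        have h2' : ¬ some "gantt" = (PySem.Dict.mk v).get? "type" := fun e => h2 e.symm
        simp [pvLoopTimeline, ih, List.mem_cons, h1, h2, h1', h2']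

theorem pvLoopCalendar_eq (vs : List (List (String × String))) :
    pvLoopCalendar vs =
      if some "calendar" ∈ vs.map (fun v => (PySem.Dict.mk v).get? "type") then some "calendar" else none := by
  induction vs with
  | nil => simp [pvLoopCalendar]
  | cons v rest ih =>
    by_cases h : (PySem.Dict.mk v).get? "type" = some "calendar"
    · simp [pvLoopCalendar, h, List.mem_cons]
    · have h' : ¬ some "calendar" = (PySem.Dict.mk v).get? "type" := fun e => h e.symm
      simp [pvLoopCalendar, ih, List.mem_cons, h, h']

-- ===== VERDICT =====
theorem determine_primary_view_py_spec : Claim_equal_determine_primary_view_py := by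
  intro views _
  unfold Spec_determine_primary_view_py determine_primary_view_py determine_primary_view_py_alt
  simp only [pvLoopKanban_eq, pvLoopTimeline_eq, pvLoopCalendar_eq]
  rw [pvFold_eq views 3 (by norm_num)]
  unfold pvMinRank
  by_cases hnil : views = []
  · subst hnil; simp
  · rw [if_neg hnil]
    by_cases hk : some "kanban" ∈ views.map (fun v => (PySem.Dict.mk v).get? "type") <;>
    by_cases ht : some "timeline" ∈ views.map (fun v => (PySem.Dict.mk v).get? "type") <;>
    by_cases hg : some "gantt" ∈ views.map (fun v => (PySem.Dict.mk v).get? "type") <;>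
    by_cases hc : some "calendar" ∈ views.map (fun v => (PySem.Dict.mk v).get? "type") <;>
    simp [hk, ht, hg, hc]
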